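-- pv_equiv track=rewrite | github.com/freshmea/micro_ros_pico_dev | doc/translate_deepl.py | split_preserve_separators
-- ===== SOURCE A (Python) =====
-- def split_preserve_separators(text: str) -> list[str]:
--     parts = []
--     buf = []
--     i = 0
--     while i < len(text):
--         if text.startswith("\n\n", i):
--             if buf:
--                 parts.append("".join(buf))
--                 buf = []
--             parts.append("\n\n")
--             i += 2
--             continue
--         buf.append(text[i])
--         i += 1
--     if buf:
--         parts.append("".join(buf))
--     return parts
-- ===== SOURCE B (Python) =====
-- def split_preserve_separators(text: str) -> list[str]:
--     chunks = text.split("\n\n")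
--     out = []
--     for i, chunk in enumerate(chunks):
--         if chunk:
--             out.append(chunk)
--         if i < len(chunks) - 1:
--             out.append("\n\n")
--     return out
-- ===== Notes on version B (the rewrite author's own statement) =====
-- stated objective: simpler
-- what changed: Replaces the manual index/buffer character-by-character scan with a staged approach: one str.split on the double-newline separator, then interleave the chunks with the separator, dropping empty chunks.
import Mathlib
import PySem

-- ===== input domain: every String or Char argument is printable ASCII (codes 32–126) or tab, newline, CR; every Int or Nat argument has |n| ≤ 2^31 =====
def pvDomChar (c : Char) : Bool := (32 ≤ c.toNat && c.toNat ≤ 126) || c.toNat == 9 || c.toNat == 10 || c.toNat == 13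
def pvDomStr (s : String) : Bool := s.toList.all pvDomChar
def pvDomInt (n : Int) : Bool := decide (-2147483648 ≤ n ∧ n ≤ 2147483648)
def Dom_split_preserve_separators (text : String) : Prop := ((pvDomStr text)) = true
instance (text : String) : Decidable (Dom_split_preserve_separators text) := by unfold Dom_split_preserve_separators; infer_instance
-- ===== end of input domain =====

-- B replaces A's single index/buffer scan by a staged split-on-"\n\n" followed by an
-- interleave with the separator, dropping empty chunks (objective: simpler).

-- ===== PORT A =====
-- while-loop over the characters: buf accumulates the current chunk, parts the output;
-- the pattern '\n' :: '\n' :: rest is text.startswith("\n\n", i).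
def pvALoop : List Char → List Char → List String → List String
  | [], buf, parts => if buf = [] then parts else parts ++ [String.mk buf]
  | '\n' :: '\n' :: rest, buf, parts =>
      pvALoop rest []
        ((if buf = [] then parts else parts ++ [String.mk buf]) ++ ["\n\n"])
  | c :: rest, buf, parts => pvALoop rest (buf ++ [c]) parts

def split_preserve_separators (text : String) : List String :=
  pvALoop text.toList [] []

-- ===== PORT B =====
-- text.split("\n\n") ported by hand as pvSplit2 (exact: leftmost non-overlapping split).
def pvSplit2 : List Char → List (List Char)
  | [] => [[]]
  | '\n' :: '\n' :: rest => [] :: pvSplit2 rest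
  | c :: rest =>
      match pvSplit2 rest with
      | h :: t => (c :: h) :: t
      | [] => [[c]]

-- the enumerate-loop of Source B: emit each non-empty chunk, a "\n\n" between consecutive chunks.
def pvJoinSep : List (List Char) → List String
  | [] => []
  | [c] => if c = [] then [] else [String.mk c]
  | c :: rest => (if c = [] then [] else [String.mk c]) ++ "\n\n" :: pvJoinSep rest

def split_preserve_separators_alt (text : String) : List String :=
  pvJoinSep (pvSplit2 text.toList)

-- ===== PRECONDITION & SPEC =====
def Spec_split_preserve_separators (text : String) (out : List String) : Prop := out = split_preserve_separators_alt text
instance (text : String) (out : List String) : Decidable (Spec_split_preserve_separators text out) := by unfold Spec_split_preserve_separators; infer_instance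

-- ===== CLAIM (what is proved, stated in full; the proofs are below) =====
def Claim_equal_split_preserve_separators : Prop := ∀ (text : String), Dom_split_preserve_separators text → Spec_split_preserve_separators text (split_preserve_separators text)

-- ===== LEMMAS AND PROOFS =====
theorem pvSplit2_ne_nil (l : List Char) : pvSplit2 l ≠ [] := by
  fun_induction pvSplit2 l <;> simp_all

-- the first chunk produced by pvSplit2 gets buf prepended
def pvMapFirst (buf : List Char) : List (List Char) → List (List Char)
  | [] => [buf]
  | h :: t => (buf ++ h) :: t

theorem pvKey : ∀ (l buf : List Char) (parts : List String),
    pvALoop l buf parts = parts ++ pvJoinSep (pvMapFirst buf (pvSplit2 l)) := by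
  intro l buf parts
  induction l, buf, parts using pvALoop.induct with
  | case1 parts =>
      simp [pvALoop, pvSplit2, pvMapFirst, pvJoinSep]
  | case2 buf parts h =>
      simp [pvALoop, pvSplit2, pvMapFirst, pvJoinSep, h]
  | case3 rest buf parts ih =>
      rw [show pvALoop ('\n' :: '\n' :: rest) buf parts
            = pvALoop rest []
                ((if buf = [] then parts else parts ++ [String.mk buf]) ++ ["\n\n"]) from rfl,
          ih]
      obtain ⟨h, t, hht⟩ : ∃ h t, pvSplit2 rest = h :: t := by
        cases hr : pvSplit2 rest with
        | nil => exact absurd hr (pvSplit2_ne_nil rest)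
        | cons h t => exact ⟨h, t, rfl⟩
      rw [show pvSplit2 ('\n' :: '\n' :: rest) = [] :: pvSplit2 rest from rfl, hht]
      simp only [pvMapFirst, pvJoinSep, List.nil_append, List.append_nil]
      split <;> simp
  | case4 c rest buf parts hx ih =>
      have hA : pvALoop (c :: rest) buf parts = pvALoop rest (buf ++ [c]) parts := by
        rw [pvALoop.eq_def]
        split
        · rename_i heq; cases heq
        · rename_i r heq; injection heq with h1 h2; exact (hx r h1 h2).elim
        · rename_i c' r hx2 heq; injection heq with h1 h2; subst h1; subst h2; rfl
      have hS : pvSplit2 (c :: rest)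
          = (match pvSplit2 rest with
             | h :: t => (c :: h) :: t
             | [] => [[c]]) := by
        rw [pvSplit2.eq_def]
        split
        · rename_i heq; cases heq
        · rename_i r heq; injection heq with h1 h2; exact (hx r h1 h2).elim
        · rename_i c' r hx2 heq; injection heq with h1 h2; subst h1; subst h2; rfl
      rw [hA, ih, hS]
      obtain ⟨h, t, hht⟩ : ∃ h t, pvSplit2 rest = h :: t := by
        cases hr : pvSplit2 rest with
        | nil => exact absurd hr (pvSplit2_ne_nil rest)
        | cons h t => exact ⟨h, t, rfl⟩
      rw [hht]
      simp [pvMapFirst]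

-- ===== VERDICT (by name: the statement is the Claim_ definition above) =====
theorem split_preserve_separators_spec : Claim_equal_split_preserve_separators := by
  intro text _
  unfold Spec_split_preserve_separators split_preserve_separators split_preserve_separators_alt
  rw [pvKey]
  obtain ⟨h, t, hht⟩ : ∃ h t, pvSplit2 text.toList = h :: t := by
    cases hr : pvSplit2 text.toList with
    | nil => exact absurd hr (pvSplit2_ne_nil text.toList)
    | cons h t => exact ⟨h, t, rfl⟩
  rw [hht]
  simp [pvMapFirst]
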